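-- pv_equiv track=rewrite | github.com/marchuec/INF8215-artificial_intelligence_methods_and_algorithms | TP2 - Local search & Constraints programming (MiniZinc)/Local search/solve.py | selection_function
-- ===== SOURCE A (Python) =====
-- def selection_function(order,cost,neighbour_cost):
--     valeur, index = min((valeur, index) for (index, valeur) in enumerate(neighbour_cost))
--     for i in range (order):
--         neighbour_cost[index] = 10**23
--         valeur, index = min((valeur, index) for (index, valeur) in enumerate(neighbour_cost))
--     if valeur< cost:
--         return index
--
--     return -1
-- ===== SOURCE B (Python) =====
-- def selection_function(order, cost, neighbour_cost):
--     k = max(order, 0)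
--     pairs = sorted((v, i) for i, v in enumerate(neighbour_cost))
--     if k < len(pairs):
--         v, i = pairs[k]
--         if v < cost:
--             return i
--     return -1
-- ===== Notes on version B (the rewrite author's own statement) =====
-- stated objective: faster
-- what changed: Replaced the order+1 repeated full-list min scans (with in-place 10**23 overwrites) by one sort of (value,index) pairs and a single index into it; B does not mutate neighbour_cost.
-- outside the precondition, e.g. on selection_function(1, 5, []): A raises ValueError, B returns -1
import Mathlib
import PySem

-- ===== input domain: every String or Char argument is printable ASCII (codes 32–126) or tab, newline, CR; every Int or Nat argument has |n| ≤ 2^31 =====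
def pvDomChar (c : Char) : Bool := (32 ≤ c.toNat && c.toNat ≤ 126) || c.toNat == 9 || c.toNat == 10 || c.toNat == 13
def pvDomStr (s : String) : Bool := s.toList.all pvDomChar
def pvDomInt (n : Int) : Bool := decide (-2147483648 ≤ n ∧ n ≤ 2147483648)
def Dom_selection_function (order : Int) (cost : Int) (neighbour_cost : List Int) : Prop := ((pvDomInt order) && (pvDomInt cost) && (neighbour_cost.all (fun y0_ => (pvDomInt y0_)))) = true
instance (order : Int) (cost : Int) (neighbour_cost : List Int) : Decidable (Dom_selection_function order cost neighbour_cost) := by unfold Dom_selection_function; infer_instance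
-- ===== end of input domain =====

-- B replaces A's order+1 repeated min scans by one sort of (value,index) pairs and a single index (faster).
-- A mutates neighbour_cost in place (overwrites its `order` smallest entries with 10**23); B does not: the
-- equivalence proved here is about the RETURN value only.

-- ===== PORT A =====
-- (value, index) pairs of the current list, as Python's `(valeur, index) for (index, valeur) in enumerate(...)`
def pvPairs (xs : List Int) : List (Int × Int) :=
  (PySem.List.enumerate xs).map (fun p => (p.2, p.1))

def selection_function (order : Int) (cost : Int) (neighbour_cost : List Int) : Int :=
  match PySem.List.min2? (pvPairs neighbour_cost) (fun p => p.1) (fun p => p.2) with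
  | none => -1  -- unreachable: Pre_ excludes the empty list (Python: ValueError from min of empty sequence)
  | some vi =>
    let st := (PySem.List.pyRange 0 order 1).foldl
      (fun (st : List Int × Int × Int) _ =>
        let nc' := PySem.List.pySetD st.1 st.2.2 (10 ^ 23)
        match PySem.List.min2? (pvPairs nc') (fun p => p.1) (fun p => p.2) with
        | some vi' => (nc', vi'.1, vi'.2)
        | none => (nc', st.2.1, st.2.2))  -- unreachable: nc' is nonempty
      (neighbour_cost, vi.1, vi.2)
    if st.2.1 < cost then st.2.2 else -1

-- ===== PORT B =====
def selection_function_alt (order : Int) (cost : Int) (neighbour_cost : List Int) : Int :=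
  let k := max order 0
  let ps := PySem.List.sorted2 (pvPairs neighbour_cost) (fun p => p.1) (fun p => p.2)
  if k < (ps.length : Int) then
    match PySem.List.pyGet? ps k with
    | some (v, i) => if v < cost then i else -1
    | none => -1  -- unreachable: 0 ≤ k < len(ps)
  else -1

-- ===== PRECONDITION & SPEC =====
-- Python A raises ValueError (min of empty sequence) exactly when neighbour_cost is empty.
def Pre_selection_function (order : Int) (cost : Int) (neighbour_cost : List Int) : Prop :=
  neighbour_cost ≠ []
instance (order : Int) (cost : Int) (neighbour_cost : List Int) : Decidable (Pre_selection_function order cost neighbour_cost) := by unfold Pre_selection_function; infer_instance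

def pvWitness_selection_function : Int × Int × List Int := (1, 5, [3, 1, 2])

def Spec_selection_function (order : Int) (cost : Int) (neighbour_cost : List Int) (out : Int) : Prop := out = selection_function_alt order cost neighbour_cost
instance (order : Int) (cost : Int) (neighbour_cost : List Int) (out : Int) : Decidable (Spec_selection_function order cost neighbour_cost out) := by unfold Spec_selection_function; infer_instance

-- ===== CLAIM (what is proved, stated in full; the proofs are below) =====
def Claim_equal_selection_function : Prop := ∀ (order : Int) (cost : Int) (neighbour_cost : List Int), Dom_selection_function order cost neighbour_cost → Pre_selection_function order cost neighbour_cost → Spec_selection_function order cost neighbour_cost (selection_function order cost neighbour_cost)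

-- ===== LEMMAS AND PROOFS =====

def pvBIG : Int := 10 ^ 23

def pvLt (a b : Int × Int) : Bool :=
  decide (a.1 < b.1) || (!decide (b.1 < a.1) && decide (a.2 < b.2))

-- the fold inside PySem.List.min2? with fst/snd keys, i.e. Python's running min over tuples
def pvMinStep (acc : Option (Int × Int)) (x : Int × Int) : Option (Int × Int) :=
  match acc with
  | none => some x
  | some m => if pvLt x m then some x else some m

-- sorted (value, index) pairs and the list after blanking the m smallest entries with 10^23
def pvS (xs : List Int) : List (Int × Int) :=
  PySem.List.sorted2 (pvPairs xs) (fun p => p.1) (fun p => p.2)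

def pvNc (xs : List Int) (m : Nat) : List Int :=
  ((pvS xs).take m).foldl (fun l p => l.set p.2.toNat pvBIG) xs

-- the body of A's loop as a function of the state
def pvStep (st : List Int × Int × Int) : List Int × Int × Int :=
  let nc' := PySem.List.pySetD st.1 st.2.2 pvBIG
  match PySem.List.min2? (pvPairs nc') (fun p => p.1) (fun p => p.2) with
  | some vi' => (nc', vi'.1, vi'.2)
  | none => (nc', st.2.1, st.2.2)

lemma pvFoldl_const_iterate {σ : Type} (f : σ → σ) (l : List Int) (init : σ) :
    l.foldl (fun st _ => f st) init = f^[l.length] init := by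
  induction l generalizing init with
  | nil => rfl
  | cons x t ih => simp [List.foldl_cons, ih, Function.iterate_succ_apply]

lemma pvMinFold_spec (l : List (Int × Int)) :
    ∀ (acc : Option (Int × Int)) (m : Int × Int), l.foldl pvMinStep acc = some m →
      (m ∈ l ∨ acc = some m) ∧ (∀ y ∈ l, pvLt y m = false) ∧
        (∀ m0, acc = some m0 → pvLt m0 m = false) := by
  induction l with
  | nil =>
    intro acc m h; simp at h
    refine ⟨by simp [h], by simp, ?_⟩
    intro m0 h0; rw [h] at h0; cases h0
    simp [pvLt]
  | cons x t ih =>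
    intro acc m h
    simp only [List.foldl_cons] at h
    obtain ⟨hmem, hall, hacc⟩ := ih (pvMinStep acc x) m h
    have hx : pvLt x m = false := by
      rcases acc with _ | m0
      · exact hacc x rfl
      · by_cases hc : pvLt x m0 = true
        · exact hacc x (by simp [pvMinStep, hc])
        · have h0 : pvLt m0 m = false := hacc m0 (by simp [pvMinStep, hc])
          simp [pvLt] at hc h0 ⊢
          omega
    refine ⟨?_, ?_, ?_⟩
    · rcases hmem with h1 | h1
      · left; exact List.mem_cons_of_mem _ h1
      · rcases acc with _ | m0
        · simp [pvMinStep] at h1; left; simp [h1]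
        · by_cases hc : pvLt x m0 = true
          · simp [pvMinStep, hc] at h1; left; simp [h1]
          · simp [pvMinStep, hc] at h1; right; simp [h1]
    · intro y hy
      rcases List.mem_cons.mp hy with h1 | h1
      · subst h1; exact hx
      · exact hall y h1
    · intro m0 h0
      subst h0
      by_cases hc : pvLt x m0 = true
      · have h1 : pvLt x m = false := hx
        have h2 := hc
        simp [pvLt] at h1 h2 ⊢
        omega
      · exact hacc m0 (by simp [pvMinStep, hc])

lemma pvMin2_eq_fold (l : List (Int × Int)) :
    PySem.List.min2? l (fun p => p.1) (fun p => p.2) = l.foldl pvMinStep none := by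
  unfold PySem.List.min2?
  congr 1
  funext acc x
  unfold pvMinStep pvLt
  rcases acc with _ | m <;> rfl

lemma pvLt_antisymm_eq {a b : Int × Int} (h1 : pvLt a b = false) (h2 : pvLt b a = false) : a = b := by
  obtain ⟨a1, a2⟩ := a; obtain ⟨b1, b2⟩ := b
  simp [pvLt] at h1 h2 ⊢; omega

lemma pvMin2_eq_of (L : List (Int × Int)) (z : Int × Int) (hz : z ∈ L)
    (hmin : ∀ y ∈ L, pvLt y z = false) :
    PySem.List.min2? L (fun p => p.1) (fun p => p.2) = some z := by
  rw [pvMin2_eq_fold]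
  rcases L with _ | ⟨x, t⟩
  · cases hz
  · have hsome : (t.foldl pvMinStep (some x)).isSome := by
      clear hz hmin
      induction t generalizing x with
      | nil => simp
      | cons y t ih => simp only [List.foldl_cons, pvMinStep]; split <;> exact ih _
    obtain ⟨m, hm⟩ := Option.isSome_iff_exists.mp hsome
    have hm' : (x :: t).foldl pvMinStep none = some m := by
      simpa [pvMinStep] using hm
    rw [hm']
    obtain ⟨hmem, hall, -⟩ := pvMinFold_spec _ _ _ hm'
    have hmem' : m ∈ x :: t := by
      rcases hmem with h | h
      · exact h
      · exact absurd h (by simp)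
    exact congrArg some (pvLt_antisymm_eq (hall z hz) (hmin m hmem')).symm

lemma pvInsert_nil (x : Int × Int) : PySem.List.insertBy pvLt x [] = [x] := rfl

lemma pvInsert_cons (x y : Int × Int) (t : List (Int × Int)) :
    PySem.List.insertBy pvLt x (y :: t) =
      (if pvLt x y then x :: y :: t else y :: PySem.List.insertBy pvLt x t) := rfl

lemma pvInsert_pairwise (x : Int × Int) (ys : List (Int × Int))
    (h : ys.Pairwise (fun a b => pvLt b a = false)) :
    (PySem.List.insertBy pvLt x ys).Pairwise (fun a b => pvLt b a = false) := by
  induction ys with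
  | nil => simp [pvInsert_nil]
  | cons y t ih =>
    rw [List.pairwise_cons] at h
    obtain ⟨hy, ht⟩ := h
    rw [pvInsert_cons]
    by_cases hc : pvLt x y = true
    · rw [if_pos hc]
      refine List.Pairwise.cons ?_ (List.Pairwise.cons hy ht)
      intro z hz
      rcases List.mem_cons.mp hz with h1 | h1
      · rw [h1]
        obtain ⟨x1, x2⟩ := x; obtain ⟨y1, y2⟩ := y
        simp [pvLt] at hc ⊢; omega
      · have h2 := hy z h1
        obtain ⟨x1, x2⟩ := x; obtain ⟨y1, y2⟩ := y; obtain ⟨z1, z2⟩ := z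
        simp [pvLt] at hc h2 ⊢; omega
    · rw [if_neg hc]
      refine List.Pairwise.cons ?_ (ih ht)
      intro z hz
      rcases (PySem.List.mem_insertBy pvLt x z t).mp hz with h1 | h1
      · rw [h1]
        simpa using hc
      · exact hy z h1

lemma pvSorted2_eq_fold (l : List (Int × Int)) :
    PySem.List.sorted2 l (fun p => p.1) (fun p => p.2) =
      l.foldl (fun acc x => PySem.List.insertBy pvLt x acc) [] := by
  unfold PySem.List.sorted2
  rfl

lemma pvSorted_pairwise (l : List (Int × Int)) :
    (PySem.List.sorted2 l (fun p => p.1) (fun p => p.2)).Pairwise (fun a b => pvLt b a = false) := by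
  rw [pvSorted2_eq_fold]
  have : ∀ (l : List (Int × Int)) (acc : List (Int × Int)),
      acc.Pairwise (fun a b => pvLt b a = false) →
      (l.foldl (fun acc x => PySem.List.insertBy pvLt x acc) acc).Pairwise
        (fun a b => pvLt b a = false) := by
    intro l
    induction l with
    | nil => intro acc h; simpa using h
    | cons x t ih => intro acc h; exact ih _ (pvInsert_pairwise x acc h)
  exact this l [] (by simp)

lemma pvMem_enumMap (l : List Int) (s : Int) (y : Int × Int) :
    y ∈ (PySem.List.enumerate l s).map (fun p => (p.2, p.1)) ↔
      ∃ (j : Nat) (hj : j < l.length), y = (l[j]'hj, s + (j : Int)) := by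
  induction l generalizing s with
  | nil => simp [PySem.List.enumerate_nil]
  | cons x t ih =>
    rw [PySem.List.enumerate_cons]
    simp only [List.map_cons, List.mem_cons, ih]
    constructor
    · rintro (h | ⟨j, hj, h⟩)
      · exact ⟨0, by simp, by simpa using h⟩
      · exact ⟨j + 1, by simpa using hj, by simp [h]; ring⟩
    · rintro ⟨j, hj, h⟩
      cases j with
      | zero => left; simpa using h
      | succ j =>
        right
        refine ⟨j, by simpa using hj, ?_⟩
        simp at h
        simp [h]; ring

lemma pvMem_pvPairs (l : List Int) (y : Int × Int) :
    y ∈ pvPairs l ↔ ∃ (j : Nat) (hj : j < l.length), y = (l[j]'hj, (j : Int)) := by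
  rw [pvPairs, pvMem_enumMap]
  simp

lemma pvPairs_map_snd (l : List Int) :
    (pvPairs l).map (fun p => p.2) = PySem.List.pyRange 0 (l.length : Int) 1 := by
  rw [pvPairs, List.map_map]
  have := PySem.List.map_fst_enumerate l 0
  simpa using this

lemma pvS_perm (xs : List Int) : (pvS xs).Perm (pvPairs xs) :=
  PySem.List.sorted2_perm _ _ _ _

lemma pvS_length (xs : List Int) : (pvS xs).length = xs.length := by
  rw [(pvS_perm xs).length_eq, pvPairs, List.length_map, PySem.List.length_enumerate]

lemma pvS_snd_nodup (xs : List Int) : ((pvS xs).map (fun p => p.2)).Nodup := by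
  have h := ((pvS_perm xs).map (fun p => p.2)).nodup_iff
  rw [h, pvPairs_map_snd]
  exact PySem.List.nodup_pyRange_one 0 (xs.length : Int)

lemma pvS_sorted_getElem (xs : List Int) (i j : Nat) (hij : i < j) (hj : j < (pvS xs).length) :
    pvLt ((pvS xs)[i]'(by omega)) ((pvS xs)[j]'hj) = true := by
  have h1 : ∀ (i j : Nat) (hi : i < (pvS xs).length) (hj : j < (pvS xs).length), i < j →
      pvLt ((pvS xs)[j]'hj) ((pvS xs)[i]'hi) = false :=
    List.pairwise_iff_getElem.mp (pvSorted_pairwise (pvPairs xs))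
  have h2 : ∀ (i j : Nat) (hi : i < (pvS xs).length) (hj : j < (pvS xs).length), i < j →
      ((pvS xs)[i]'hi).2 ≠ ((pvS xs)[j]'hj).2 := by
    have hnd := pvS_snd_nodup xs
    rw [List.Nodup, List.pairwise_map] at hnd
    exact List.pairwise_iff_getElem.mp hnd
  have ha := h1 i j (by omega) hj hij
  have hb := h2 i j (by omega) hj hij
  revert ha hb
  generalize (pvS xs)[i]'(by omega) = a
  generalize (pvS xs)[j]'hj = b
  obtain ⟨a1, a2⟩ := a; obtain ⟨b1, b2⟩ := b
  intro ha hb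
  simp [pvLt] at ha hb ⊢
  omega

lemma pvS_mem_char (xs : List Int) (y : Int × Int) (hy : y ∈ pvS xs) :
    ∃ (j : Nat) (hj : j < xs.length), y = (xs[j]'hj, (j : Int)) := by
  exact (pvMem_pvPairs xs y).mp ((pvS_perm xs).mem_iff.mp hy)

lemma pvFold_set_length (ps : List (Int × Int)) (l : List Int) :
    (ps.foldl (fun l p => l.set p.2.toNat pvBIG) l).length = l.length := by
  induction ps generalizing l with
  | nil => rfl
  | cons p ps ih => simp [List.foldl_cons, ih]

lemma pvNc_length (xs : List Int) (m : Nat) : (pvNc xs m).length = xs.length := by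
  exact pvFold_set_length _ _

lemma pvFold_set_get? (ps : List (Int × Int)) (l : List Int) (j : Nat) (hj : j < l.length)
    (hps : ∀ p ∈ ps, 0 ≤ p.2) :
    (ps.foldl (fun l p => l.set p.2.toNat pvBIG) l)[j]? =
      some (if (j : Int) ∈ ps.map (fun p => p.2) then pvBIG else l[j]'hj) := by
  induction ps generalizing l with
  | nil => simp [List.getElem?_eq_getElem hj]
  | cons p ps ih =>
    have hp0 : 0 ≤ p.2 := hps p (by simp)
    have hj' : j < (l.set p.2.toNat pvBIG).length := by simpa using hj
    rw [List.foldl_cons, ih _ hj' (fun q hq => hps q (by simp [hq]))]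
    by_cases hmem : (j : Int) ∈ ps.map (fun p => p.2)
    · simp [hmem]
    · rw [if_neg hmem]
      have hset : (l.set p.2.toNat pvBIG)[j]'hj' = if p.2.toNat = j then pvBIG else l[j]'hj :=
        List.getElem_set hj'
      by_cases hpj : (j : Int) = p.2
      · have : p.2.toNat = j := by omega
        simp [List.mem_cons, hpj, this]
      · have hne : p.2.toNat ≠ j := by omega
        rw [hset, if_neg hne]
        rw [if_neg (by simp [hpj, hmem])]

lemma pvLt_irrefl (a : Int × Int) : pvLt a a = false := by simp [pvLt]

lemma pvLt_asymm_false {a b : Int × Int} (h : pvLt a b = true) : pvLt b a = false := by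
  obtain ⟨a1, a2⟩ := a; obtain ⟨b1, b2⟩ := b
  simp [pvLt] at h ⊢; omega

lemma pvS_snd_ne (xs : List Int) (i j : Nat) (hij : i < j) (hj : j < (pvS xs).length) :
    ((pvS xs)[i]'(by omega)).2 ≠ ((pvS xs)[j]'hj).2 := by
  have hnd := pvS_snd_nodup xs
  rw [List.Nodup, List.pairwise_map] at hnd
  exact List.pairwise_iff_getElem.mp hnd i j (by omega) hj hij

lemma pvNc_getElem (xs : List Int) (m j : Nat) (hj : j < xs.length) :
    (pvNc xs m)[j]'(by rw [pvNc_length]; exact hj) =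
      if (j : Int) ∈ ((pvS xs).take m).map (fun p => p.2) then pvBIG else xs[j]'hj := by
  have hps : ∀ p ∈ (pvS xs).take m, 0 ≤ p.2 := by
    intro p hp
    obtain ⟨i, hi, h⟩ := pvS_mem_char xs p (List.mem_of_mem_take hp)
    simp [h]
  have h := pvFold_set_get? ((pvS xs).take m) xs j hj hps
  rw [List.getElem?_eq_getElem (by rw [pvFold_set_length]; exact hj)] at h
  exact Option.some.inj h

lemma pvTake_snd_mem (xs : List Int) (m : Nat) (j : Int) :
    j ∈ ((pvS xs).take m).map (fun p => p.2) ↔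
      ∃ (i : Nat) (hi : i < min m (pvS xs).length), ((pvS xs)[i]'(by omega)).2 = j := by
  rw [List.mem_map]
  constructor
  · rintro ⟨p, hp, hpj⟩
    obtain ⟨i, hi, h⟩ := List.mem_take_iff_getElem.mp hp
    exact ⟨i, by omega, by rw [← h] at hpj; simpa using hpj⟩
  · rintro ⟨i, hi, h⟩
    refine ⟨(pvS xs)[i]'(by omega), List.mem_take_iff_getElem.mpr ⟨i, by omega, rfl⟩, h⟩

lemma pvMinNc (xs : List Int) (hne : xs ≠ []) (hb : ∀ v ∈ xs, v ≤ 2 ^ 31) (m : Nat)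
    (hm : m ≤ xs.length) :
    PySem.List.min2? (pvPairs (pvNc xs m)) (fun p => p.1) (fun p => p.2) =
      some ((pvS xs).getD m (pvBIG, 0)) := by
  have hn : 0 < xs.length := List.length_pos_iff.mpr hne
  have hSlen := pvS_length xs
  -- membership description of pvPairs (pvNc xs m)
  have hmemNc : ∀ y : Int × Int, y ∈ pvPairs (pvNc xs m) ↔
      ∃ (j : Nat) (hj : j < xs.length),
        y = (if (j : Int) ∈ ((pvS xs).take m).map (fun p => p.2) then pvBIG else xs[j]'hj,
             (j : Int)) := by
    intro y
    rw [pvMem_pvPairs]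
    constructor
    · rintro ⟨j, hj, h⟩
      have hj' : j < xs.length := by rwa [pvNc_length] at hj
      exact ⟨j, hj', by rw [h, pvNc_getElem xs m j hj']⟩
    · rintro ⟨j, hj, h⟩
      exact ⟨j, by rw [pvNc_length]; exact hj, by rw [h, pvNc_getElem xs m j hj]⟩
  by_cases hcase : m < xs.length
  · -- z = S[m]
    have hmS : m < (pvS xs).length := by omega
    have hz := List.getD_eq_getElem (pvS xs) (pvBIG, 0) hmS
    rw [hz]
    obtain ⟨j, hj, hchar⟩ := pvS_mem_char xs ((pvS xs)[m]'hmS) (List.getElem_mem hmS)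
    apply pvMin2_eq_of
    · -- membership
      rw [hmemNc]
      refine ⟨j, hj, ?_⟩
      rw [if_neg ?_, ← hchar]
      intro hmem
      obtain ⟨i, hi, h⟩ := (pvTake_snd_mem xs m (j : Int)).mp hmem
      have : ((pvS xs)[i]'(by omega)).2 ≠ ((pvS xs)[m]'hmS).2 := pvS_snd_ne xs i m (by omega) hmS
      rw [hchar] at this
      simp at this
      exact this (by exact_mod_cast h)
    · -- minimality
      intro y hy
      obtain ⟨j', hj', h⟩ := (hmemNc y).mp hy
      by_cases hmem : (j' : Int) ∈ ((pvS xs).take m).map (fun p => p.2)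
      · rw [if_pos hmem] at h
        have hv : ((pvS xs)[m]'hmS).1 ≤ 2 ^ 31 := by
          rw [hchar]; exact hb _ (List.getElem_mem hj)
        rw [h]
        revert hv
        generalize (pvS xs)[m]'hmS = z
        obtain ⟨z1, z2⟩ := z
        intro hv
        simp [pvLt, pvBIG] at hv ⊢
        omega
      · rw [if_neg hmem] at h
        have hyS : y ∈ pvS xs := by
          rw [(pvS_perm xs).mem_iff, pvMem_pvPairs]
          exact ⟨j', hj', h⟩
        obtain ⟨l, hl, hly⟩ := List.mem_iff_getElem.mp hyS
        rcases lt_trichotomy l m with h1 | h1 | h1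
        · exfalso
          apply hmem
          rw [pvTake_snd_mem]
          exact ⟨l, by omega, by rw [hly, h]⟩
        · subst h1; rw [← hly]; exact pvLt_irrefl _
        · rw [← hly]; exact pvLt_asymm_false (pvS_sorted_getElem xs m l h1 hl)
  · -- m = length: everything is BIG, minimum is (BIG, 0)
    have hmn : m = xs.length := by omega
    have hz : (pvS xs).getD m (pvBIG, 0) = (pvBIG, 0) :=
      List.getD_eq_default _ _ (by omega)
    rw [hz]
    have hall : ∀ (j : Nat), j < xs.length → (j : Int) ∈ ((pvS xs).take m).map (fun p => p.2) := by
      intro j hj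
      have : (pvS xs).take m = pvS xs := List.take_of_length_le (by omega)
      rw [this]
      have hperm := (pvS_perm xs).map (fun p => p.2)
      rw [hperm.mem_iff, pvPairs_map_snd, PySem.List.mem_pyRange_one]
      omega
    apply pvMin2_eq_of
    · rw [hmemNc]
      exact ⟨0, hn, by rw [if_pos (hall 0 hn)]; norm_num⟩
    · intro y hy
      obtain ⟨j', hj', h⟩ := (hmemNc y).mp hy
      rw [if_pos (hall j' hj')] at h
      rw [h]
      simp [pvLt]

lemma pvInv (xs : List Int) (hne : xs ≠ []) (hb : ∀ v ∈ xs, v ≤ 2 ^ 31) (m : Nat) :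
    pvStep^[m] (xs, ((pvS xs).getD 0 (pvBIG, 0)).1, ((pvS xs).getD 0 (pvBIG, 0)).2) =
      (pvNc xs (min m xs.length), ((pvS xs).getD m (pvBIG, 0)).1,
        ((pvS xs).getD m (pvBIG, 0)).2) := by
  have hn : 0 < xs.length := List.length_pos_iff.mpr hne
  have hSlen := pvS_length xs
  induction m with
  | zero =>
    simp only [Function.iterate_zero, id_eq, Nat.zero_min]
    rfl
  | succ m ih =>
    rw [Function.iterate_succ_apply', ih]
    by_cases hcase : m < xs.length
    · -- active phase
      have hmS : m < (pvS xs).length := by omega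
      have hgetD : (pvS xs).getD m (pvBIG, 0) = (pvS xs)[m]'hmS :=
        List.getD_eq_getElem _ _ hmS
      obtain ⟨j, hj, hchar⟩ := pvS_mem_char xs ((pvS xs)[m]'hmS) (List.getElem_mem hmS)
      have hmin' : min m xs.length = m := by omega
      have h2 : (pvS xs).take (m + 1) = (pvS xs).take m ++ [(pvS xs)[m]'hmS] := by
        rw [List.take_add_one, List.getElem?_eq_getElem hmS]
        rfl
      have h3 : pvNc xs (m + 1) = (pvNc xs m).set j pvBIG := by
        rw [pvNc, h2, List.foldl_append, hchar]
        rfl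
      have hset : PySem.List.pySetD (pvNc xs m) (((pvS xs).getD m (pvBIG, 0)).2) pvBIG =
          pvNc xs (m + 1) := by
        rw [hgetD, hchar, h3]
        simp [PySem.List.pySetD_natCast]
      have hmin2 := pvMinNc xs hne hb (m + 1) (by omega)
      simp only [pvStep, hmin', hset, hmin2]
      rw [show min (m + 1) xs.length = m + 1 from by omega]
    · -- saturated phase: the list is all 10^23 and the state is ((pvBIG, 0))
      have hmn : min m xs.length = xs.length := by omega
      have hmn' : min (m + 1) xs.length = xs.length := by omega
      have hgetD : (pvS xs).getD m (pvBIG, 0) = (pvBIG, 0) :=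
        List.getD_eq_default _ _ (by omega)
      have hgetD' : (pvS xs).getD (m + 1) (pvBIG, 0) = (pvBIG, 0) :=
        List.getD_eq_default _ _ (by omega)
      have hall : ∀ (j : Nat), j < xs.length →
          (j : Int) ∈ ((pvS xs).take xs.length).map (fun p => p.2) := by
        intro j hjn
        have ht : (pvS xs).take xs.length = pvS xs := List.take_of_length_le (by omega)
        rw [ht]
        have hperm := (pvS_perm xs).map (fun p => p.2)
        rw [hperm.mem_iff, pvPairs_map_snd, PySem.List.mem_pyRange_one]
        omega
      have hset : PySem.List.pySetD (pvNc xs xs.length) ((0 : Int)) pvBIG =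
          pvNc xs xs.length := by
        rw [show (0 : Int) = ((0 : Nat) : Int) from rfl, PySem.List.pySetD_natCast]
        apply List.ext_getElem (by simp)
        intro i hi1 hi2
        have hi : i < xs.length := by
          have := pvNc_length xs xs.length; omega
        rw [List.getElem_set]
        have hbig : (pvNc xs xs.length)[i]'(by rw [pvNc_length]; exact hi) = pvBIG := by
          rw [pvNc_getElem xs xs.length i hi, if_pos (hall i hi)]
        split
        · rw [hbig]
        · rfl
      have hmin2 := pvMinNc xs hne hb xs.length (by omega)
      have hend : (pvS xs).getD xs.length (pvBIG, 0) = (pvBIG, 0) :=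
        List.getD_eq_default _ _ (by omega)
      rw [hmn, hmn', hgetD, hgetD']
      simp only [pvStep]
      rw [hset]
      rw [hmin2, hend]

-- ===== VERDICT (by name: the statement is the Claim_ definition above) =====
theorem selection_function_spec : Claim_equal_selection_function := by
  intro order cost nc hdom hpre
  unfold Spec_selection_function
  have hne : nc ≠ [] := hpre
  have hn : 0 < nc.length := List.length_pos_iff.mpr hne
  have hdom' := hdom
  simp only [Dom_selection_function, pvDomInt, Bool.and_eq_true, List.all_eq_true,
    decide_eq_true_eq] at hdom'
  have hcost : cost ≤ 2 ^ 31 := by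
    have := hdom'.1.2; norm_num at this ⊢; omega
  have hb : ∀ v ∈ nc, v ≤ 2 ^ 31 := by
    intro v hv
    have := hdom'.2 v hv; norm_num at this ⊢; omega
  have hSlen := pvS_length nc
  -- A's first min is the head of the sorted pair list
  have hmin0 : PySem.List.min2? (pvPairs nc) (fun p => p.1) (fun p => p.2) =
      some ((pvS nc).getD 0 (pvBIG, 0)) := by
    have h := pvMinNc nc hne hb 0 (by omega)
    simpa [pvNc] using h
  -- A's loop is the iterate of pvStep
  have hiter : ∀ (l : List Int) (init : List Int × Int × Int),
      l.foldl (fun st _ =>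
        let nc' := PySem.List.pySetD st.1 st.2.2 (10 ^ 23)
        match PySem.List.min2? (pvPairs nc') (fun p => p.1) (fun p => p.2) with
        | some vi' => (nc', vi'.1, vi'.2)
        | none => (nc', st.2.1, st.2.2)) init = pvStep^[l.length] init :=
    fun l init => pvFoldl_const_iterate pvStep l init
  unfold selection_function
  rw [hmin0]
  simp only [hiter, PySem.List.length_pyRange_one, Int.sub_zero]
  rw [pvInv nc hne hb order.toNat]
  have halt : selection_function_alt order cost nc =
      (if max order 0 < ((pvS nc).length : Int) then
        match PySem.List.pyGet? (pvS nc) (max order 0) with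
        | some (v, i) => if v < cost then i else -1
        | none => -1
      else -1) := rfl
  rw [halt]
  have hmax : max order 0 = ((order.toNat : Nat) : Int) := (Int.toNat_eq_max order).symm
  by_cases hk : order.toNat < nc.length
  · have hkS : order.toNat < (pvS nc).length := by omega
    have hgetD : (pvS nc).getD order.toNat (pvBIG, 0) = (pvS nc)[order.toNat]'hkS :=
      List.getD_eq_getElem _ _ hkS
    have hcond : max order 0 < ((pvS nc).length : Int) := by
      rw [hmax]; exact_mod_cast hkS
    rw [if_pos hcond, hmax, PySem.List.pyGet?_natCast, List.getElem?_eq_getElem hkS]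
    rcases hz : (pvS nc)[order.toNat]'hkS with ⟨v, i⟩
    rw [hgetD, hz]
  · have hgetD : (pvS nc).getD order.toNat (pvBIG, 0) = (pvBIG, 0) :=
      List.getD_eq_default _ _ (by omega)
    have hcond : ¬ (max order 0 < ((pvS nc).length : Int)) := by
      rw [hmax]
      push Not
      exact_mod_cast (by omega : (pvS nc).length ≤ order.toNat)
    rw [if_neg hcond, hgetD]
    dsimp only
    rw [if_neg (by simp only [pvBIG]; omega)]
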